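-- pv_equiv track=rewrite | github.com/aoiorio/uehara-challengers | python_18_m/main.py | diff_list
-- ===== SOURCE A (Python) =====
-- def diff_list(list: list) -> list:
--     list_even = []
--     list_odd = []
--     for i in list:
--         if i % 2 == 0:
--             list_even.append(i)
--         else:
--             list_odd.append(i)
--     list_even.sort()
--     list_odd.sort(reverse=True)
--     return [list_even,list_odd]
-- ===== SOURCE B (Python) =====
-- def diff_list(list: list) -> list:
--     s = sorted(list)
--     evens = [x for x in s if x % 2 == 0]
--     odds = [x for x in reversed(s) if x % 2 != 0]
--     return [evens, odds]
-- ===== Notes on version B (the rewrite author's own statement) =====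
-- stated objective: alternative
-- what changed: B sorts the whole list once and then filters the sorted copy (evens ascending, odds from the reversed copy so they come out descending), instead of A's partition-first-then-two-separate-sorts.
import Mathlib
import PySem

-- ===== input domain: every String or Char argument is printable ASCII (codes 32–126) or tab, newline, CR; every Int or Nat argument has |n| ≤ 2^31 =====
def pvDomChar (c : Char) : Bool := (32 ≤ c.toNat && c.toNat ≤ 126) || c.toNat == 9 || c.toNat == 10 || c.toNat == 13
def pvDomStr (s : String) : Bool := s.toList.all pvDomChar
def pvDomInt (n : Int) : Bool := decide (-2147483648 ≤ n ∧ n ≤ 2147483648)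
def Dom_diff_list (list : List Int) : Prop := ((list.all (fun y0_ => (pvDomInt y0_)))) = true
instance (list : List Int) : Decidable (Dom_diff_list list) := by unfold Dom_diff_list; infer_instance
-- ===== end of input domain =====

-- B sorts the list once and filters the sorted copy (odds from its reverse), instead of A's partition-then-two-sorts; alternative decomposition, same cost.


-- ===== PORT A =====
-- partition by the loop, then sort evens ascending and odds with reverse=True
def diff_list (list : List Int) : List (List Int) :=
  let p := list.foldl
    (fun acc i =>
      if PySem.Int.mod i 2 == 0 then (acc.1 ++ [i], acc.2) else (acc.1, acc.2 ++ [i]))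
    (([] : List Int), ([] : List Int))
  [PySem.List.sorted p.1 (fun x => x) false, PySem.List.sorted p.2 (fun x => x) true]

-- ===== PORT B =====
-- sort once, filter the sorted copy; odds filtered from the reversed copy
def diff_list_alt (list : List Int) : List (List Int) :=
  let s := PySem.List.sorted list (fun x => x) false
  let evens := s.filter (fun x => PySem.Int.mod x 2 == 0)
  let odds := s.reverse.filter (fun x => !(PySem.Int.mod x 2 == 0))
  [evens, odds]

-- ===== PRECONDITION & SPEC =====
def Spec_diff_list (list : List Int) (out : List (List Int)) : Prop := out = diff_list_alt list
instance (list : List Int) (out : List (List Int)) : Decidable (Spec_diff_list list out) := by unfold Spec_diff_list; infer_instance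

-- ===== CLAIM (what is proved, stated in full; the proofs are below) =====
def Claim_equal_diff_list : Prop := ∀ (list : List Int), Dom_diff_list list → Spec_diff_list list (diff_list list)

-- ===== LEMMAS AND PROOFS =====

-- A's partition loop accumulates exactly the two filters
theorem pv_fold_partition (list : List Int) (e o : List Int) :
    list.foldl
      (fun acc i =>
        if PySem.Int.mod i 2 == 0 then (acc.1 ++ [i], acc.2) else (acc.1, acc.2 ++ [i]))
      (e, o)
    = (e ++ list.filter (fun x => PySem.Int.mod x 2 == 0),
       o ++ list.filter (fun x => !(PySem.Int.mod x 2 == 0))) := by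
  induction list generalizing e o with
  | nil => simp
  | cons x xs ih =>
    simp only [List.foldl_cons, List.filter_cons]
    cases hb : (PySem.Int.mod x 2 == 0)
    · simp only [Bool.not_false, Bool.false_eq_true, if_false, if_true]
      rw [ih]; simp
    · simp only [Bool.not_true, Bool.false_eq_true, if_false, if_true]
      rw [ih]; simp

-- sorting commutes with filtering
theorem pv_sorted_filter (list : List Int) (p : Int → Bool) :
    PySem.List.sorted (list.filter p) (fun x => x) false
      = (PySem.List.sorted list (fun x => x) false).filter p := by
  apply PySem.List.sorted_id_eq_of_perm_of_pairwise
  · exact (PySem.List.sorted_perm list (fun x => x) false).filter p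
  · exact (PySem.List.sorted_pairwise list (fun x => x)).filter p

-- reverse=True sort is the reverse of the ascending sort (over Int values)
theorem pv_sorted_rev_eq_reverse (list : List Int) :
    PySem.List.sorted list (fun x => x) true
      = (PySem.List.sorted list (fun x => x) false).reverse := by
  have h : PySem.List.sorted list (fun x => x) false
      = (PySem.List.sorted list (fun x => x) true).reverse := by
    apply PySem.List.sorted_id_eq_of_perm_of_pairwise
    · exact (List.reverse_perm _).trans (PySem.List.sorted_perm list (fun x => x) true)
    · exact (List.pairwise_reverse).mpr (PySem.List.sorted_pairwise_rev list (fun x => x))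
  rw [h, List.reverse_reverse]

-- ===== VERDICT (by name: the statement is the Claim_ definition above) =====
theorem diff_list_spec : Claim_equal_diff_list := by
  intro list _
  unfold Spec_diff_list diff_list diff_list_alt
  simp only [pv_fold_partition, List.nil_append]
  rw [pv_sorted_filter, pv_sorted_rev_eq_reverse, pv_sorted_filter, List.filter_reverse]
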